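-- pv_equiv track=rewrite | github.com/devkingKR/january-corporation | download_resources.py | should_download
-- ===== SOURCE A (Python) =====
-- def should_download(url):
--     """Check if URL should be downloaded"""
--     # Skip these patterns
--     skip_patterns = [
--         'wp-json/',
--         'wp-admin/',
--         '?p=',
--         '#',
--         'oembed',
--         'admin-ajax.php'
--     ]
--
--     for pattern in skip_patterns:
--         if pattern in url:
--             return False
--
--     # Only download actual files
--     if url.endswith('/'):
--         return False
--
--     return True
-- ===== SOURCE B (Python) =====
-- def should_download(url):
--     """Check if URL should be downloaded"""
--     patterns = ('wp-json/', 'wp-admin/', '?p=', '#', 'oembed', 'admin-ajax.php')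
--     # One left-to-right scan over positions: at each index test whether any
--     # skip pattern begins there, instead of one substring search per pattern.
--     for i in range(len(url)):
--         for p in patterns:
--             if url.startswith(p, i):
--                 return False
--     return not url.endswith('/')
-- ===== Notes on version B (the rewrite author's own statement) =====
-- stated objective: alternative
-- what changed: Replaces the pattern-major loop of substring-containment tests (one containment test per pattern) by a single position-major scan of the URL that tests startswith for each pattern at every index, with the trailing-slash rule folded into one final boolean expression.
import Mathlib
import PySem

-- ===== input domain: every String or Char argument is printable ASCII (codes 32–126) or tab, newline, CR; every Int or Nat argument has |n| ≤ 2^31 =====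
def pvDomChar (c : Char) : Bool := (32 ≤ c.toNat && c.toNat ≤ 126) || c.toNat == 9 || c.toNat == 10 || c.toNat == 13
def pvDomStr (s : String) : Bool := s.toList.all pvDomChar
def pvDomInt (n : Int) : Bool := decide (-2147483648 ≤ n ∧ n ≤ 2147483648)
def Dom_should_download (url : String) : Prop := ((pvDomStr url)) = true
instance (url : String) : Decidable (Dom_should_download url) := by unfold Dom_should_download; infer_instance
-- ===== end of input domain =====

-- B replaces A's pattern-major containment loop by a single position-major scan
-- testing startswith at every index (alternative decomposition, same cost).
-- ===== PORT A =====
-- for pattern in skip_patterns: if pattern in url: return False; then trailing-slash check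
def pvLoopA (ps : List String) (url : String) : Bool :=
  match ps with
  | [] => if PySem.Str.endswith url "/" then false else true
  | p :: rest => if PySem.Str.isIn p url then false else pvLoopA rest url

def should_download (url : String) : Bool :=
  pvLoopA ["wp-json/", "wp-admin/", "?p=", "#", "oembed", "admin-ajax.php"] url

-- ===== PORT B =====
def pvPatterns : List String := ["wp-json/", "wp-admin/", "?p=", "#", "oembed", "admin-ajax.php"]

-- for i in range(len(url)): for p in patterns: if url.startswith(p, i): return False
-- (recursion over the suffixes of the URL = the positions i; url.startswith(p, i) is
--  PySem.Chars.startswith on the suffix starting at i, exact on this domain)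
def pvScanB (s : List Char) : Bool :=
  match s with
  | [] => false
  | c :: t => pvPatterns.any (fun p => PySem.Chars.startswith (c :: t) p.toList) || pvScanB t

def should_download_alt (url : String) : Bool :=
  if pvScanB url.toList then false else !(PySem.Str.endswith url "/")

-- ===== PRECONDITION & SPEC =====
def Spec_should_download (url : String) (out : Bool) : Prop := out = should_download_alt url
instance (url : String) (out : Bool) : Decidable (Spec_should_download url out) := by unfold Spec_should_download; infer_instance

-- ===== CLAIM (what is proved, stated in full; the proofs are below) =====
def Claim_equal_should_download : Prop := ∀ (url : String), Dom_should_download url → Spec_should_download url (should_download url)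

-- ===== LEMMAS AND PROOFS =====

-- ===== VERDICT (by name: the statement is the Claim_ definition above) =====
lemma pvScanB_iff (s : List Char) :
    pvScanB s = true ↔ ∃ p ∈ pvPatterns, ∃ j, p.toList <+: s.drop j := by
  induction s with
  | nil =>
      simp only [pvScanB, Bool.false_eq_true, false_iff]
      rintro ⟨p, hp, j, hpre⟩
      simp only [List.drop_nil, List.prefix_nil] at hpre
      fin_cases hp <;> simp_all
  | cons c t ih =>
      simp only [pvScanB, Bool.or_eq_true, List.any_eq_true, PySem.Chars.startswith_iff, ih]
      constructor
      · rintro (⟨p, hp, hpre⟩ | ⟨p, hp, j, hpre⟩)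
        · exact ⟨p, hp, 0, by simpa using hpre⟩
        · exact ⟨p, hp, j + 1, by simpa using hpre⟩
      · rintro ⟨p, hp, j, hpre⟩
        cases j with
        | zero => exact Or.inl ⟨p, hp, by simpa using hpre⟩
        | succ j => exact Or.inr ⟨p, hp, j, by simpa using hpre⟩

lemma pvIsIn_iff_exists (p url : String) :
    PySem.Str.isIn p url = true ↔ ∃ j, p.toList <+: url.toList.drop j := by
  rw [PySem.Str.isIn_iff_infix, ← PySem.Chars.isIn_iff_infix,
    ← PySem.Chars.exists_prefix_drop_iff_isIn]

lemma pvScanB_eq_any (url : String) :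
    pvScanB url.toList = pvPatterns.any (fun p => PySem.Str.isIn p url) := by
  rw [Bool.eq_iff_iff, pvScanB_iff]
  simp only [List.any_eq_true, pvIsIn_iff_exists]

-- ===== VERDICT (by name: the statement is the Claim_ definition above) =====
theorem should_download_spec : Claim_equal_should_download := by
  intro url _
  unfold Spec_should_download should_download should_download_alt
  rw [pvScanB_eq_any]
  simp only [pvPatterns, List.any_cons, List.any_nil, Bool.or_false, pvLoopA]
  split_ifs <;> simp_all
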